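-- pv_equiv track=rewrite | github.com/Hangma01/CodingTest | Python/Programmers/Level1/모의고사/codingTest.py | solution
-- ===== SOURCE A (Python) =====
-- def solution(answers):
--     a=[1,2,3,4,5]
--     b=[2,1,2,3,2,4,2,5]
--     c=[3,3,1,1,2,2,4,4,5,5]
--
--     aCnt=0
--     bCnt=0
--     cCnt=0
--
--     aa=[]
--     bb=[]
--     cc=[]
--
--     for i in range(len(answers)):
--         aa.append(a[i%len(a)])
--         bb.append(b[i%len(b)])
--         cc.append(c[i%len(c)])
--
--
--     for i in range(len(answers)):
--
--         if aa[i] == answers[i]: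
--             aCnt +=1
--         if bb[i] == answers[i]:
--             bCnt +=1
--         if cc[i] == answers[i]:
--             cCnt +=1
--
--
--     item = {1 : aCnt, 2 : bCnt, 3 : cCnt}
--     maxVal = max(item.values())
--
--     return [key for key, value in item.items() if value == maxVal]
-- ===== SOURCE B (Python) =====
-- def solution(answers):
--     # Histogram approach: the three patterns all repeat with period dividing 40,
--     # so bucket each answer once by (position mod 40, value), then score each
--     # pattern from the 40 buckets instead of rescanning the answers per pattern.
--     cnt = {}
--     for i, ans in enumerate(answers):
--         key = (i % 40, ans)
--         cnt[key] = cnt.get(key, 0) + 1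
--     patterns = [(1, [1, 2, 3, 4, 5]),
--                 (2, [2, 1, 2, 3, 2, 4, 2, 5]),
--                 (3, [3, 3, 1, 1, 2, 2, 4, 4, 5, 5])]
--     scores = [(k, sum(cnt.get((r, pat[r % len(pat)]), 0) for r in range(40)))
--               for k, pat in patterns]
--     best = max(s for _, s in scores)
--     return [k for k, s in scores if s == best]
-- ===== Notes on version B (the rewrite author's own statement) =====
-- stated objective: alternative
-- what changed: B replaces A's three expanded pattern lists plus a second index loop with three parallel counters by a residue histogram: one pass buckets answers by (index mod 40, value) into a dict, and each pattern's score is then read off the 40 buckets (pattern period divides 40), never rescanning the answers.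
import Mathlib
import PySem

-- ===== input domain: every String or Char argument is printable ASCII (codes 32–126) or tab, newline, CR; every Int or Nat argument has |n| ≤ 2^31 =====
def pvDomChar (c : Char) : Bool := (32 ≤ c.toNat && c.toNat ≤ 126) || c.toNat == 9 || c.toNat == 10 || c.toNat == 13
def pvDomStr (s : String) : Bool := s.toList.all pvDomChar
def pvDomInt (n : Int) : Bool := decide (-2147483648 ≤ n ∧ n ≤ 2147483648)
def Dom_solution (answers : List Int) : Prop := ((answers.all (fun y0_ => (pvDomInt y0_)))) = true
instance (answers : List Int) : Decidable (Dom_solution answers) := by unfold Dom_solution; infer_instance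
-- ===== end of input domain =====

-- B replaces A's expanded-pattern-lists-plus-counter-loop by a (index mod 40, value) histogram
-- built in one pass, from which each pattern's score is read off; objective: alternative.


-- ===== PORT A =====
def solution (answers : List Int) : List Int :=
  let a : List Int := [1, 2, 3, 4, 5]
  let b : List Int := [2, 1, 2, 3, 2, 4, 2, 5]
  let c : List Int := [3, 3, 1, 1, 2, 2, 4, 4, 5, 5]
  -- first loop: build aa, bb, cc by appending a[i%5], b[i%8], c[i%10]
  let built : List Int × List Int × List Int :=
    (PySem.List.pyRange 0 (answers.length : Int)).foldl
      (fun s i =>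
        (s.1 ++ [PySem.List.pyGetD a (PySem.Int.mod i 5) 0],
         s.2.1 ++ [PySem.List.pyGetD b (PySem.Int.mod i 8) 0],
         s.2.2 ++ [PySem.List.pyGetD c (PySem.Int.mod i 10) 0]))
      ([], [], [])
  -- second loop: the three counters
  let cnts : Int × Int × Int :=
    (PySem.List.pyRange 0 (answers.length : Int)).foldl
      (fun s i =>
        ((if PySem.List.pyGetD built.1 i 0 = PySem.List.pyGetD answers i 0 then s.1 + 1 else s.1),
         (if PySem.List.pyGetD built.2.1 i 0 = PySem.List.pyGetD answers i 0 then s.2.1 + 1 else s.2.1),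
         (if PySem.List.pyGetD built.2.2 i 0 = PySem.List.pyGetD answers i 0 then s.2.2 + 1 else s.2.2)))
      (0, 0, 0)
  let item : List (Int × Int) := [(1, cnts.1), (2, cnts.2.1), (3, cnts.2.2)]
  -- max(item.values()); item always has three entries, so max? is some and the default is never used
  let maxVal : Int := (PySem.List.max? (item.map (·.2)) id).getD 0
  (item.filter (fun kv => kv.2 == maxVal)).map (·.1)

-- ===== PORT B =====
def solution_alt (answers : List Int) : List Int :=
  -- cnt[(i % 40, ans)] = cnt.get(key, 0) + 1  over enumerate(answers)
  let cnt : PySem.Dict (Int × Int) Int :=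
    (PySem.List.enumerate answers 0).foldl
      (fun d p => d.insert (PySem.Int.mod p.1 40, p.2) (d.getD (PySem.Int.mod p.1 40, p.2) 0 + 1))
      PySem.Dict.empty
  let patterns : List (Int × List Int) :=
    [(1, [1, 2, 3, 4, 5]), (2, [2, 1, 2, 3, 2, 4, 2, 5]), (3, [3, 3, 1, 1, 2, 2, 4, 4, 5, 5])]
  -- sum(cnt.get((r, pat[r % len(pat)]), 0) for r in range(40))
  let scores : List (Int × Int) :=
    patterns.map (fun kp =>
      (kp.1,
       (PySem.List.pyRange 0 40 1).foldl
         (fun acc r =>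
           acc + cnt.getD (r, PySem.List.pyGetD kp.2 (PySem.Int.mod r (kp.2.length : Int)) 0) 0)
         0))
  -- max(s for _, s in scores); scores always has three entries, so the default is never used
  let best : Int := (PySem.List.max? (scores.map (·.2)) id).getD 0
  (scores.filter (fun kv => kv.2 == best)).map (·.1)

-- ===== PRECONDITION & SPEC =====
def Spec_solution (answers : List Int) (out : List Int) : Prop := out = solution_alt answers
instance (answers : List Int) (out : List Int) : Decidable (Spec_solution answers out) := by unfold Spec_solution; infer_instance

-- ===== CLAIM (what is proved, stated in full; the proofs are below) =====
def Claim_equal_solution : Prop := ∀ (answers : List Int), Dom_solution answers → Spec_solution answers (solution answers)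

-- ===== LEMMAS AND PROOFS =====

-- the direct per-pattern count both sides reduce to
def pvScore (pat : List Int) (answers : List Int) : Int :=
  (PySem.List.enumerate answers 0).foldl
    (fun acc p =>
      if PySem.List.pyGetD pat (PySem.Int.mod p.1 (pat.length : Int)) 0 = p.2 then acc + 1 else acc)
    0

-- getD on a cons, shifted by one, for a positive python index
theorem pvGetD_cons_shift (x : Int) (xs : List Int) (k : Int) (d : Int) (hk : 1 ≤ k) :
    PySem.List.pyGetD (x :: xs) k d = PySem.List.pyGetD xs (k - 1) d := by
  rw [PySem.List.pyGetD_of_nonneg _ _ (by omega), PySem.List.pyGetD_of_nonneg _ _ (by omega)]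
  have h : k.toNat = (k - 1).toNat + 1 := by omega
  rw [h]
  rfl

-- B's enumerate-fold equals the corresponding index-range fold
theorem pvEnum_range (pat : List Int) (L : Int) (xs : List Int) :
    ∀ (s acc : Int), 0 ≤ s →
    (PySem.List.enumerate xs s).foldl
      (fun acc p => if PySem.List.pyGetD pat (PySem.Int.mod p.1 L) 0 = p.2 then acc + 1 else acc) acc
    = (PySem.List.pyRange s (s + (xs.length : Int))).foldl
      (fun acc i => if PySem.List.pyGetD pat (PySem.Int.mod i L) 0 = PySem.List.pyGetD xs (i - s) 0
         then acc + 1 else acc) acc := by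
  induction xs with
  | nil =>
      intro s acc hs
      simp [PySem.List.enumerate]
  | cons x xs ih =>
      intro s acc hs
      rw [PySem.List.enumerate_cons,
          PySem.List.pyRange_one_cons (show s < s + (((x :: xs).length : Nat) : Int) by simp)]
      simp only [List.foldl_cons]
      have hhead : PySem.List.pyGetD (x :: xs) (s - s) 0 = x := by
        simp
      rw [hhead]
      have hb : s + ((x :: xs).length : Int) = (s + 1) + (xs.length : Int) := by
        simp; omega
      rw [hb, ih (s + 1) _ (by omega : (0:Int) ≤ s + 1)]
      apply PySem.List.foldl_congr_mem
      intro acc' i hi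
      have hmem := (PySem.List.mem_pyRange_one).1 hi
      rw [pvGetD_cons_shift x xs (i - s) 0 (by omega)]
      have : i - s - 1 = i - (s + 1) := by omega
      rw [this]

-- A's per-pattern count (over the prebuilt list) equals pvScore
theorem pvCount_eq_score (pat : List Int) (L : Int) (hL : L = (pat.length : Int)) (answers : List Int) :
    (PySem.List.pyRange 0 (answers.length : Int)).foldl
      (fun acc i =>
        if PySem.List.pyGetD
            ((PySem.List.pyRange 0 (answers.length : Int)).map
              (fun i => PySem.List.pyGetD pat (PySem.Int.mod i L) 0)) i 0
          = PySem.List.pyGetD answers i 0 then acc + 1 else acc) 0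
    = pvScore pat answers := by
  subst hL
  rw [pvScore, pvEnum_range pat (pat.length : Int) answers 0 0 le_rfl]
  simp only [zero_add]
  apply PySem.List.foldl_congr_mem
  intro acc i hi
  have hmem := (PySem.List.mem_pyRange_one).1 hi
  have hk : i = ((i.toNat : Nat) : Int) := by omega
  have hlt : i.toNat < answers.length := by omega
  rw [hk, PySem.List.pyGetD_map_pyRange _ _ _ _ hlt]
  simp

theorem pvBuild (answers : List Int) :
    (PySem.List.pyRange 0 (answers.length : Int)).foldl
      (fun (s : List Int × List Int × List Int) i =>
        (s.1 ++ [PySem.List.pyGetD ([1, 2, 3, 4, 5] : List Int) (PySem.Int.mod i 5) 0],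
         s.2.1 ++ [PySem.List.pyGetD ([2, 1, 2, 3, 2, 4, 2, 5] : List Int) (PySem.Int.mod i 8) 0],
         s.2.2 ++ [PySem.List.pyGetD ([3, 3, 1, 1, 2, 2, 4, 4, 5, 5] : List Int) (PySem.Int.mod i 10) 0]))
      ([], [], [])
    = ((PySem.List.pyRange 0 (answers.length : Int)).map
         (fun i => PySem.List.pyGetD ([1, 2, 3, 4, 5] : List Int) (PySem.Int.mod i 5) 0),
       (PySem.List.pyRange 0 (answers.length : Int)).map
         (fun i => PySem.List.pyGetD ([2, 1, 2, 3, 2, 4, 2, 5] : List Int) (PySem.Int.mod i 8) 0),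
       (PySem.List.pyRange 0 (answers.length : Int)).map
         (fun i => PySem.List.pyGetD ([3, 3, 1, 1, 2, 2, 4, 4, 5, 5] : List Int) (PySem.Int.mod i 10) 0)) := by
  rw [PySem.List.foldl_prod_mk
        (fun s i => s ++ [PySem.List.pyGetD ([1, 2, 3, 4, 5] : List Int) (PySem.Int.mod i 5) 0])
        (fun s i => (s.1 ++ [PySem.List.pyGetD ([2, 1, 2, 3, 2, 4, 2, 5] : List Int) (PySem.Int.mod i 8) 0],
                     s.2 ++ [PySem.List.pyGetD ([3, 3, 1, 1, 2, 2, 4, 4, 5, 5] : List Int) (PySem.Int.mod i 10) 0]))]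
  rw [PySem.List.foldl_prod_mk
        (fun s i => s ++ [PySem.List.pyGetD ([2, 1, 2, 3, 2, 4, 2, 5] : List Int) (PySem.Int.mod i 8) 0])
        (fun s i => s ++ [PySem.List.pyGetD ([3, 3, 1, 1, 2, 2, 4, 4, 5, 5] : List Int) (PySem.Int.mod i 10) 0])]
  rw [PySem.List.foldl_append_singleton_eq_map, PySem.List.foldl_append_singleton_eq_map,
      PySem.List.foldl_append_singleton_eq_map]
  simp

theorem pvCnts (answers : List Int) :
    (PySem.List.pyRange 0 (answers.length : Int)).foldl
      (fun (s : Int × Int × Int) i =>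
        ((if PySem.List.pyGetD
             ((PySem.List.pyRange 0 (answers.length : Int)).map
               (fun i => PySem.List.pyGetD ([1, 2, 3, 4, 5] : List Int) (PySem.Int.mod i 5) 0)) i 0
           = PySem.List.pyGetD answers i 0 then s.1 + 1 else s.1),
         (if PySem.List.pyGetD
             ((PySem.List.pyRange 0 (answers.length : Int)).map
               (fun i => PySem.List.pyGetD ([2, 1, 2, 3, 2, 4, 2, 5] : List Int) (PySem.Int.mod i 8) 0)) i 0
           = PySem.List.pyGetD answers i 0 then s.2.1 + 1 else s.2.1),
         (if PySem.List.pyGetD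
             ((PySem.List.pyRange 0 (answers.length : Int)).map
               (fun i => PySem.List.pyGetD ([3, 3, 1, 1, 2, 2, 4, 4, 5, 5] : List Int) (PySem.Int.mod i 10) 0)) i 0
           = PySem.List.pyGetD answers i 0 then s.2.2 + 1 else s.2.2)))
      (0, 0, 0)
    = (pvScore ([1, 2, 3, 4, 5] : List Int) answers,
       pvScore ([2, 1, 2, 3, 2, 4, 2, 5] : List Int) answers,
       pvScore ([3, 3, 1, 1, 2, 2, 4, 4, 5, 5] : List Int) answers) := by
  rw [PySem.List.foldl_prod_mk
        (fun (s : Int) (i : Int) => if PySem.List.pyGetD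
            ((PySem.List.pyRange 0 (answers.length : Int)).map
              (fun i => PySem.List.pyGetD ([1, 2, 3, 4, 5] : List Int) (PySem.Int.mod i 5) 0)) i 0
          = PySem.List.pyGetD answers i 0 then s + 1 else s)
        (fun (s : Int × Int) (i : Int) =>
          ((if PySem.List.pyGetD
              ((PySem.List.pyRange 0 (answers.length : Int)).map
                (fun i => PySem.List.pyGetD ([2, 1, 2, 3, 2, 4, 2, 5] : List Int) (PySem.Int.mod i 8) 0)) i 0
            = PySem.List.pyGetD answers i 0 then s.1 + 1 else s.1),
           (if PySem.List.pyGetD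
              ((PySem.List.pyRange 0 (answers.length : Int)).map
                (fun i => PySem.List.pyGetD ([3, 3, 1, 1, 2, 2, 4, 4, 5, 5] : List Int) (PySem.Int.mod i 10) 0)) i 0
            = PySem.List.pyGetD answers i 0 then s.2 + 1 else s.2)))]
  rw [PySem.List.foldl_prod_mk
        (fun (s : Int) (i : Int) => if PySem.List.pyGetD
            ((PySem.List.pyRange 0 (answers.length : Int)).map
              (fun i => PySem.List.pyGetD ([2, 1, 2, 3, 2, 4, 2, 5] : List Int) (PySem.Int.mod i 8) 0)) i 0
          = PySem.List.pyGetD answers i 0 then s + 1 else s)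
        (fun (s : Int) (i : Int) => if PySem.List.pyGetD
            ((PySem.List.pyRange 0 (answers.length : Int)).map
              (fun i => PySem.List.pyGetD ([3, 3, 1, 1, 2, 2, 4, 4, 5, 5] : List Int) (PySem.Int.mod i 10) 0)) i 0
          = PySem.List.pyGetD answers i 0 then s + 1 else s)]
  rw [(pvCount_eq_score ([1, 2, 3, 4, 5] : List Int) 5 (by simp) answers),
      (pvCount_eq_score ([2, 1, 2, 3, 2, 4, 2, 5] : List Int) 8 (by simp) answers),
      (pvCount_eq_score ([3, 3, 1, 1, 2, 2, 4, 4, 5, 5] : List Int) 10 (by simp) answers)]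

-- ---- B side: the histogram score equals pvScore ----

-- sum over a nodup residue list of a point indicator: 1 iff the pair matches its own residue's value
theorem pvIndicator_sum_zero (rs : List Int) (g : Int → Int) (p : Int × Int) (hnot : p.1 ∉ rs) :
    ((rs.map (fun r => if p = (r, g r) then (1 : Int) else 0)).sum) = 0 := by
  induction rs with
  | nil => simp
  | cons r t ih =>
      simp only [List.mem_cons, not_or] at hnot
      have : p ≠ (r, g r) := by
        intro h; exact hnot.1 (by rw [h])
      simp [this, ih hnot.2]

theorem pvIndicator_sum (rs : List Int) (g : Int → Int) (p : Int × Int)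
    (hnd : rs.Nodup) (hq : p.1 ∈ rs) :
    ((rs.map (fun r => if p = (r, g r) then (1 : Int) else 0)).sum)
    = if p.2 = g p.1 then 1 else 0 := by
  induction rs with
  | nil => cases hq
  | cons r t ih =>
      rcases List.nodup_cons.1 hnd with ⟨hr, hndt⟩
      simp only [List.map_cons, List.sum_cons]
      by_cases hEq : p.1 = r
      · subst hEq
        rw [pvIndicator_sum_zero t g p hr]
        have : (p = (p.1, g p.1)) ↔ (p.2 = g p.1) := by
          constructor
          · intro h; rw [Prod.ext_iff] at h; exact h.2
          · intro h; exact Prod.ext rfl h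
        simp only [this]
        split_ifs <;> simp
      · have hqt : p.1 ∈ t := by
          rcases List.mem_cons.1 hq with h | h
          · exact absurd h hEq
          · exact h
        have : p ≠ (r, g r) := by
          intro h; apply hEq; rw [h]
        rw [if_neg this, zero_add, ih hndt hqt]

-- sum over residues of histogram counts = countP of the key list
theorem pvSum_count (l : List (Int × Int)) (g : Int → Int)
    (hmem : ∀ p ∈ l, p.1 ∈ PySem.List.pyRange 0 40 1) :
    ((PySem.List.pyRange 0 40 1).map (fun r => ((l.count (r, g r) : Nat) : Int))).sum
    = ((l.countP (fun p => decide (p.2 = g p.1)) : Nat) : Int) := by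
  induction l with
  | nil => simp
  | cons p t ih =>
      have hp := hmem p (List.mem_cons_self)
      have ht : ∀ q ∈ t, q.1 ∈ PySem.List.pyRange 0 40 1 := fun q hq => hmem q (List.mem_cons_of_mem _ hq)
      have hcount : ∀ r : Int, ((((p :: t).count (r, g r) : Nat)) : Int)
          = ((t.count (r, g r) : Nat) : Int) + (if p = (r, g r) then (1:Int) else 0) := by
        intro r
        rw [List.count_cons]
        by_cases h : p = (r, g r)
        · simp [h]
        · have : ((r, g r) == p) = false := by
            simp; intro he; exact h he.symm
          simp [h]
      calc ((PySem.List.pyRange 0 40 1).map (fun r => (((p :: t).count (r, g r) : Nat) : Int))).sum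
          = ((PySem.List.pyRange 0 40 1).map
              (fun r => ((t.count (r, g r) : Nat) : Int) + (if p = (r, g r) then (1:Int) else 0))).sum := by
            congr 1; apply List.map_congr_left; intro r _; exact hcount r
        _ = ((PySem.List.pyRange 0 40 1).map (fun r => ((t.count (r, g r) : Nat) : Int))).sum
            + ((PySem.List.pyRange 0 40 1).map (fun r => if p = (r, g r) then (1:Int) else 0)).sum := by
            rw [← List.sum_map_add]
        _ = ((t.countP (fun q => decide (q.2 = g q.1)) : Nat) : Int)
            + (if p.2 = g p.1 then 1 else 0) := by
            rw [ih ht, pvIndicator_sum _ g p (PySem.List.nodup_pyRange_one 0 40) hp]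
        _ = (((p :: t).countP (fun q => decide (q.2 = g q.1)) : Nat) : Int) := by
            rw [List.countP_cons]
            by_cases h : p.2 = g p.1 <;> simp [h]

-- (i % 40) % L = i % L when L divides 40
theorem pvModMod (i L : Int) (hL : 0 < L) (hdvd : L ∣ 40) :
    PySem.Int.mod (PySem.Int.mod i 40) L = PySem.Int.mod i L := by
  rw [PySem.Int.mod_eq_emod_of_pos (show (0:Int) < 40 by norm_num),
      PySem.Int.mod_eq_emod_of_pos hL, PySem.Int.mod_eq_emod_of_pos hL]
  exact Int.emod_emod_of_dvd i hdvd

-- the whole B-side score for one pattern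
theorem pvHistScore (pat : List Int) (L : Int) (hL : L = (pat.length : Int)) (hpos : 0 < L)
    (hdvd : L ∣ 40) (answers : List Int) :
    (PySem.List.pyRange 0 40 1).foldl
      (fun acc r =>
        acc + (((PySem.List.enumerate answers 0).foldl
          (fun d p => d.insert (PySem.Int.mod p.1 40, p.2) (d.getD (PySem.Int.mod p.1 40, p.2) 0 + 1))
          PySem.Dict.empty).getD (r, PySem.List.pyGetD pat (PySem.Int.mod r L) 0) 0))
      0
    = pvScore pat answers := by
  subst hL
  -- name the key list
  have hfold : ∀ r v, (((PySem.List.enumerate answers 0).foldl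
        (fun d p => d.insert (PySem.Int.mod p.1 40, p.2) (d.getD (PySem.Int.mod p.1 40, p.2) 0 + 1))
        (PySem.Dict.empty : PySem.Dict (Int × Int) Int)).getD (r, v) 0)
      = (((((PySem.List.enumerate answers 0).map (fun p => (PySem.Int.mod p.1 40, p.2))).count (r, v) : Nat) : Int)) := by
    intro r v
    have h1 : (PySem.List.enumerate answers 0).foldl
        (fun d p => d.insert (PySem.Int.mod p.1 40, p.2) (d.getD (PySem.Int.mod p.1 40, p.2) 0 + 1))
        (PySem.Dict.empty : PySem.Dict (Int × Int) Int)
      = ((PySem.List.enumerate answers 0).map (fun p => (PySem.Int.mod p.1 40, p.2))).foldl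
        (fun d x => d.insert x (d.getD x 0 + 1)) PySem.Dict.empty := by
      rw [List.foldl_map]
    rw [h1, PySem.Dict.getD_foldl_insert_add_one, PySem.Dict.getD_empty, zero_add]
  -- turn the foldl-sum into a map-sum
  rw [PySem.List.foldl_add (PySem.List.pyRange 0 40 1) (fun r =>
      (((PySem.List.enumerate answers 0).foldl
        (fun d p => d.insert (PySem.Int.mod p.1 40, p.2) (d.getD (PySem.Int.mod p.1 40, p.2) 0 + 1))
        PySem.Dict.empty).getD (r, PySem.List.pyGetD pat (PySem.Int.mod r ((pat.length : Nat) : Int)) 0) 0)) 0]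
  rw [zero_add]
  have hmap : ((PySem.List.pyRange 0 40 1).map (fun r =>
      (((PySem.List.enumerate answers 0).foldl
        (fun d p => d.insert (PySem.Int.mod p.1 40, p.2) (d.getD (PySem.Int.mod p.1 40, p.2) 0 + 1))
        PySem.Dict.empty).getD (r, PySem.List.pyGetD pat (PySem.Int.mod r ((pat.length : Nat) : Int)) 0) 0)))
      = ((PySem.List.pyRange 0 40 1).map (fun r =>
        ((((PySem.List.enumerate answers 0).map (fun p => (PySem.Int.mod p.1 40, p.2))).count
            (r, PySem.List.pyGetD pat (PySem.Int.mod r ((pat.length : Nat) : Int)) 0) : Nat) : Int))) := by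
    apply List.map_congr_left; intro r _; exact hfold r _
  rw [hmap]
  rw [pvSum_count _ (fun r => PySem.List.pyGetD pat (PySem.Int.mod r ((pat.length : Nat) : Int)) 0)
      (by
        intro p hp
        rcases List.mem_map.1 hp with ⟨q, _, rfl⟩
        rw [PySem.List.mem_pyRange_one]
        exact ⟨PySem.Int.mod_nonneg _ (by norm_num), PySem.Int.mod_lt _ (by norm_num)⟩)]
  -- now relate countP over the mapped key list to pvScore
  rw [List.countP_map]
  have hcongr : ((PySem.List.enumerate answers 0).countP
        ((fun p : Int × Int => decide (p.2 = PySem.List.pyGetD pat (PySem.Int.mod p.1 ((pat.length : Nat) : Int)) 0)) ∘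
          (fun p => (PySem.Int.mod p.1 40, p.2))))
      = ((PySem.List.enumerate answers 0).countP
        (fun p : Int × Int => decide (PySem.List.pyGetD pat (PySem.Int.mod p.1 ((pat.length : Nat) : Int)) 0 = p.2))) := by
    apply List.countP_congr
    intro p _
    simp only [Function.comp]
    rw [pvModMod p.1 ((pat.length : Nat) : Int) hpos hdvd]
    constructor <;> intro h <;> · simp only [decide_eq_true_eq] at h ⊢; exact h.symm
  rw [hcongr, pvScore, PySem.List.foldl_ite_add_one
      (fun p : Int × Int => PySem.List.pyGetD pat (PySem.Int.mod p.1 (pat.length : Int)) 0 = p.2)]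
  rw [zero_add]

theorem pv_main (answers : List Int) : solution answers = solution_alt answers := by
  rw [solution, solution_alt]
  simp only [pvBuild, pvCnts, List.map_cons, List.map_nil,
    pvHistScore ([1, 2, 3, 4, 5] : List Int) ((([1, 2, 3, 4, 5] : List Int).length : Int)) rfl
      (by norm_num) (by norm_num) answers,
    pvHistScore ([2, 1, 2, 3, 2, 4, 2, 5] : List Int) ((([2, 1, 2, 3, 2, 4, 2, 5] : List Int).length : Int)) rfl
      (by norm_num) (by norm_num) answers,
    pvHistScore ([3, 3, 1, 1, 2, 2, 4, 4, 5, 5] : List Int) ((([3, 3, 1, 1, 2, 2, 4, 4, 5, 5] : List Int).length : Int)) rfl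
      (by norm_num) (by norm_num) answers]

-- ===== VERDICT (by name: the statement is the Claim_ definition above) =====
theorem solution_spec : Claim_equal_solution := by
  intro answers _
  unfold Spec_solution
  exact pv_main answers
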